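-- pv_equiv track=rewrite | github.com/yyaghoobzadeh/figment-multi | src/data_prep/ds_to_figer_types.py | addhighleveltypes
-- ===== SOURCE A (Python) =====
-- def addhighleveltypes(inittypes, fig2parents):
--     extended_types = inittypes
--     for myt in inittypes:
--         if myt in fig2parents:
--             for parent in fig2parents[myt]:
--                 if parent not in inittypes:
--                     extended_types.append(parent)
--     assert len(extended_types) >= len(inittypes)
--     return extended_types
-- ===== SOURCE B (Python) =====
-- def addhighleveltypes(inittypes, fig2parents):
--     # Fixpoint by repeated passes over a snapshot with a 'changed' flag, plus a
--     # membership set, instead of iterating (and linearly re-scanning) the list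
--     # while it grows; mutates inittypes in place like the original.
--     extended_types = inittypes
--     present = set(extended_types)
--     changed = True
--     while changed:
--         changed = False
--         for myt in list(extended_types):
--             for parent in fig2parents.get(myt, []):
--                 if parent not in present:
--                     extended_types.append(parent)
--                     present.add(parent)
--                     changed = True
--     assert len(extended_types) >= len(inittypes)
--     return extended_types
-- ===== Notes on version B (the rewrite author's own statement) =====
-- stated objective: faster
-- what changed: Replaces A's single loop that iterates over the very list it is appending to (with a linear 'parent not in inittypes' scan per edge) by an outer fixpoint iteration: repeated full passes over a snapshot of the list, guarded by a 'changed' flag, with a hash set for membership, until a pass adds nothing.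
import Mathlib
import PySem

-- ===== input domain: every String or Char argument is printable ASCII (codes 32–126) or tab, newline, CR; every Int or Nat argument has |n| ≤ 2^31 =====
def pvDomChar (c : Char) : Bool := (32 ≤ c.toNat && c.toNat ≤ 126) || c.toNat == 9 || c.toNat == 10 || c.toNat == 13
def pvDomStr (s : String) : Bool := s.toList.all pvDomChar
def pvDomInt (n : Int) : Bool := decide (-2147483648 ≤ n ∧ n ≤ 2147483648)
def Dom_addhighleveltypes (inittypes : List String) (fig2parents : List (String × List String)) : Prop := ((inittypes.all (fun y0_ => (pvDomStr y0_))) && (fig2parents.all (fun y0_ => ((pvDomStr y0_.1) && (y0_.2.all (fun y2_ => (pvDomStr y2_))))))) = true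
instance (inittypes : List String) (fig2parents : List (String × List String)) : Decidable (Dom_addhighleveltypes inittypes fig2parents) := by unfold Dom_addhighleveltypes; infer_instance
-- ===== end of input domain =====

-- B replaces A's single loop over the list it is growing (with its linear membership re-scans)
-- by an outer fixpoint loop of full passes over a snapshot with a 'changed' flag and a membership
-- set; both Pythons mutate the argument list in place identically, equivalence is about the return value.

-- ===== PORT A =====
-- 'if parent not in inittypes: inittypes.append(parent)'
def pvInsert (acc : List String) (p : String) : List String :=
  if acc.contains p then acc else acc ++ [p]

-- loop body for one 'myt': 'if myt in fig2parents: for parent in fig2parents[myt]: …'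
def pvStep (fig2parents : List (String × List String)) (e : List String) (myt : String) : List String :=
  match (PySem.Dict.mk fig2parents).get? myt with
  | some parents => parents.foldl pvInsert e
  | none => e

-- 'for myt in inittypes' over the list that grows while being iterated: index i into the current
-- list; the fuel only makes the same computation total (it always suffices, see the proofs).
def pvALoop (fig2parents : List (String × List String)) : Nat → List String → Nat → List String
  | 0, e, _ => e
  | fuel+1, e, i =>
    if h : i < e.length then pvALoop fig2parents fuel (pvStep fig2parents e e[i]) (i+1) else e

def addhighleveltypes (inittypes : List String) (fig2parents : List (String × List String)) : List String :=
  pvALoop fig2parents (inittypes.length + (fig2parents.map (fun p => p.2.length)).sum + 1) inittypes 0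

-- ===== PORT B =====
-- inner 'for parent in fig2parents.get(myt, []): if parent not in present: append; add; changed = True'
def pvPassStep (fig2parents : List (String × List String)) (st : List String × PySem.Set String × Bool) (myt : String) : List String × PySem.Set String × Bool :=
  ((PySem.Dict.mk fig2parents).getD myt []).foldl
    (fun st p => if PySem.Set.contains st.2.1 p then st
                 else (st.1 ++ [p], PySem.Set.add st.2.1 p, true)) st

-- 'while changed:' — one recursion step per pass; the fuel only makes the same computation total.
def pvBFix (fig2parents : List (String × List String)) : Nat → List String → PySem.Set String → List String
  | 0, e, _ => e
  | fuel+1, e, present =>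
    let st := e.foldl (pvPassStep fig2parents) (e, present, false)
    if st.2.2 then pvBFix fig2parents fuel st.1 st.2.1 else st.1

def addhighleveltypes_alt (inittypes : List String) (fig2parents : List (String × List String)) : List String :=
  pvBFix fig2parents (inittypes.length + (fig2parents.map (fun p => p.2.length)).sum + 1)
    inittypes (PySem.Set.ofList inittypes)

-- ===== PRECONDITION & SPEC =====
def Spec_addhighleveltypes (inittypes : List String) (fig2parents : List (String × List String)) (out : List String) : Prop := out = addhighleveltypes_alt inittypes fig2parents
instance (inittypes : List String) (fig2parents : List (String × List String)) (out : List String) : Decidable (Spec_addhighleveltypes inittypes fig2parents out) := by unfold Spec_addhighleveltypes; infer_instance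

-- ===== CLAIM (what is proved, stated in full; the proofs are below) =====
def Claim_equal_addhighleveltypes : Prop := ∀ (inittypes : List String) (fig2parents : List (String × List String)), Dom_addhighleveltypes inittypes fig2parents → Spec_addhighleveltypes inittypes fig2parents (addhighleveltypes inittypes fig2parents)

-- ===== LEMMAS AND PROOFS =====

-- the parent list A and B both look up for a key (getD-form; [] when absent)
def pvParents (fig2parents : List (String × List String)) (myt : String) : List String :=
  (PySem.Dict.mk fig2parents).getD myt []

theorem pvStep_eq (fp : List (String × List String)) (e : List String) (myt : String) :
    pvStep fp e myt = (pvParents fp myt).foldl pvInsert e := by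
  unfold pvStep pvParents
  rw [PySem.Dict.getD_eq_get?_getD]
  cases (PySem.Dict.mk fp).get? myt <;> rfl

theorem pvInsert_prefix (e : List String) (p : String) : e <+: pvInsert e p := by
  unfold pvInsert; split
  · exact List.prefix_rfl
  · exact List.prefix_append e [p]

theorem foldl_pvInsert_prefix (ps : List String) : ∀ e, e <+: ps.foldl pvInsert e := by
  induction ps with
  | nil => intro e; exact List.prefix_rfl
  | cons p ps ih => intro e; exact (pvInsert_prefix e p).trans (ih (pvInsert e p))

theorem pvStep_prefix (fp : List (String × List String)) (e : List String) (myt : String) :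
    e <+: pvStep fp e myt := by
  rw [pvStep_eq]; exact foldl_pvInsert_prefix _ e

theorem foldl_pvStep_prefix (fp : List (String × List String)) (s : List String) :
    ∀ e, e <+: s.foldl (pvStep fp) e := by
  induction s with
  | nil => intro e; exact List.prefix_rfl
  | cons a s ih => intro e; exact (pvStep_prefix fp e a).trans (ih _)

theorem mem_pvInsert_self (e : List String) (p : String) : p ∈ pvInsert e p := by
  unfold pvInsert; split
  · next h => exact List.contains_iff_mem.mp h
  · simp

theorem mem_foldl_pvInsert_of_mem (ps : List String) :
    ∀ e p, p ∈ ps → p ∈ ps.foldl pvInsert e := by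
  induction ps with
  | nil => intro e p h; cases h
  | cons q ps ih =>
    intro e p h
    rcases List.mem_cons.mp h with h | h
    · subst h
      exact (foldl_pvInsert_prefix ps (pvInsert e p)).subset (mem_pvInsert_self e p)
    · exact ih _ p h

theorem foldl_pvInsert_noop (ps : List String) :
    ∀ e, (∀ p ∈ ps, p ∈ e) → ps.foldl pvInsert e = e := by
  induction ps with
  | nil => intro e _; rfl
  | cons p ps ih =>
    intro e h
    have hp : e.contains p := List.contains_iff_mem.mpr (h p (by simp))
    simp only [List.foldl_cons, pvInsert, hp, if_true]
    exact ih e (fun q hq => h q (by simp [hq]))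

theorem pvStep_noop (fp : List (String × List String)) (e : List String) (myt : String)
    (h : ∀ p ∈ pvParents fp myt, p ∈ e) : pvStep fp e myt = e := by
  rw [pvStep_eq]
  exact foldl_pvInsert_noop _ e h

-- every parent of an element of the snapshot is in the result of a full pass
theorem pv_sat (fp : List (String × List String)) (s : List String) :
    ∀ acc myt, myt ∈ s → ∀ p ∈ pvParents fp myt, p ∈ s.foldl (pvStep fp) acc := by
  induction s with
  | nil => intro acc myt h; cases h
  | cons a s ih =>
    intro acc myt h p hp
    rcases List.mem_cons.mp h with h | h
    · subst h
      refine (foldl_pvStep_prefix fp s (pvStep fp acc myt)).subset ?_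
      rw [pvStep_eq]
      exact mem_foldl_pvInsert_of_mem _ acc p hp
    · exact ih _ myt h p hp

theorem foldl_pvStep_noop (fp : List (String × List String)) (s : List String) :
    ∀ acc, (∀ a ∈ s, ∀ p ∈ pvParents fp a, p ∈ acc) → s.foldl (pvStep fp) acc = acc := by
  induction s with
  | nil => intro acc _; rfl
  | cons a s ih =>
    intro acc h
    have h0 : pvStep fp acc a = acc := pvStep_noop fp acc a (h a (by simp))
    rw [List.foldl_cons, h0]
    exact ih acc (fun b hb => h b (by simp [hb]))

theorem prefix_getElem? {l₁ l₂ : List String} (h : l₁ <+: l₂) {k : Nat} {x : String}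
    (hk : l₁[k]? = some x) : l₂[k]? = some x := by
  obtain ⟨t, rfl⟩ := h
  have hlt : k < l₁.length := by
    by_contra hge
    rw [List.getElem?_eq_none (by omega)] at hk; cases hk
  rw [List.getElem?_append_left hlt]; exact hk

-- running A's loop across a segment of positions whose values are the snapshot s
theorem pv_aseg (fp : List (String × List String)) (s : List String) :
    ∀ (e : List String) (i fuel : Nat), i + s.length ≤ e.length →
      (∀ k, (hk : k < s.length) → e[i+k]? = some s[k]) →
      pvALoop fp (s.length + fuel) e i = pvALoop fp fuel (s.foldl (pvStep fp) e) (i + s.length) := by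
  induction s with
  | nil => intro e i fuel _ _; simp
  | cons a s ih =>
    intro e i fuel hlen hidx
    have hi : i < e.length := by simp at hlen; omega
    have ha : e[i] = a := by
      have := hidx 0 (by simp)
      simp only [Nat.add_zero] at this
      rw [List.getElem?_eq_getElem hi] at this
      simpa using this
    have hstep : e <+: pvStep fp e a := pvStep_prefix fp e a
    have hrec := ih (pvStep fp e a) (i+1) fuel
      (by have := hstep.length_le; simp at hlen ⊢; omega)
      (by
        intro k hk
        have := hidx (k+1) (by simp; omega)
        have hk' : e[i+1+k]? = some s[k] := by
          rw [show i+1+k = i+(k+1) by omega]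
          simpa using this
        exact prefix_getElem? hstep hk')
    have hfuel : (a :: s).length + fuel = (s.length + fuel) + 1 := by simp; omega
    rw [hfuel, pvALoop, dif_pos hi, ha, hrec]
    simp only [List.foldl_cons, List.length_cons]
    congr 1
    omega

theorem pv_aterm (fp : List (String × List String)) :
    ∀ fuel e i, e.length ≤ i → pvALoop fp fuel e i = e := by
  intro fuel e i h
  cases fuel with
  | zero => rfl
  | succ fuel => rw [pvALoop, dif_neg (by omega)]

-- facts about the flagged inner fold of one pass element (the seen set mirrors list membership)
theorem pv_pairfold (ps : List String) :
    ∀ (st : List String × PySem.Set String × Bool), (∀ x : String, x ∈ st.2.1 ↔ x ∈ st.1) →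
      (ps.foldl (fun st p => if PySem.Set.contains st.2.1 p then st
          else (st.1 ++ [p], PySem.Set.add st.2.1 p, true)) st).1 = ps.foldl pvInsert st.1
      ∧ (∀ x : String, x ∈ (ps.foldl (fun st p => if PySem.Set.contains st.2.1 p then st
          else (st.1 ++ [p], PySem.Set.add st.2.1 p, true)) st).2.1 ↔
          x ∈ (ps.foldl (fun st p => if PySem.Set.contains st.2.1 p then st
          else (st.1 ++ [p], PySem.Set.add st.2.1 p, true)) st).1)
      ∧ (st.2.2 = true → (ps.foldl (fun st p => if PySem.Set.contains st.2.1 p then st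
          else (st.1 ++ [p], PySem.Set.add st.2.1 p, true)) st).2.2 = true)
      ∧ ((ps.foldl (fun st p => if PySem.Set.contains st.2.1 p then st
          else (st.1 ++ [p], PySem.Set.add st.2.1 p, true)) st).2.2 = false →
          (ps.foldl (fun st p => if PySem.Set.contains st.2.1 p then st
          else (st.1 ++ [p], PySem.Set.add st.2.1 p, true)) st).1 = st.1)
      ∧ (st.2.2 = false → (ps.foldl (fun st p => if PySem.Set.contains st.2.1 p then st
          else (st.1 ++ [p], PySem.Set.add st.2.1 p, true)) st).2.2 = true →
          st.1.length < (ps.foldl (fun st p => if PySem.Set.contains st.2.1 p then st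
          else (st.1 ++ [p], PySem.Set.add st.2.1 p, true)) st).1.length) := by
  induction ps with
  | nil =>
    intro st hseen
    refine ⟨rfl, hseen, fun h => h, fun _ => rfl, fun h h' => ?_⟩
    simp only [List.foldl_nil] at h'; rw [h] at h'; cases h'
  | cons p ps ih =>
    intro st hseen
    have hcond : PySem.Set.contains st.2.1 p = st.1.contains p := by
      rw [Bool.eq_iff_iff, PySem.Set.contains_iff, List.contains_iff_mem]
      exact hseen p
    by_cases hc : st.1.contains p = true
    · simp only [List.foldl_cons, hcond, hc, if_true, pvInsert]
      exact ih st hseen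
    · simp only [Bool.not_eq_true] at hc
      simp only [List.foldl_cons, hcond, hc, Bool.false_eq_true, if_false, pvInsert]
      have hseen' : ∀ x : String, x ∈ PySem.Set.add st.2.1 p ↔ x ∈ st.1 ++ [p] := by
        intro x
        simp [PySem.Set.mem_add, hseen x]
      obtain ⟨h1, h0, h2, h3, _⟩ := ih (st.1 ++ [p], PySem.Set.add st.2.1 p, true) hseen'
      refine ⟨h1, h0, fun _ => h2 rfl, fun hf => Bool.noConfusion ((h2 rfl).symm.trans hf), fun _ _ => ?_⟩
      calc st.1.length < (st.1 ++ [p]).length := by simp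
        _ ≤ _ := by rw [h1]; exact (foldl_pvInsert_prefix ps (st.1 ++ [p])).length_le

-- the same facts for a full pass over a snapshot
theorem pv_passfold (fp : List (String × List String)) (snap : List String) :
    ∀ (st : List String × PySem.Set String × Bool), (∀ x : String, x ∈ st.2.1 ↔ x ∈ st.1) →
      (snap.foldl (pvPassStep fp) st).1 = snap.foldl (pvStep fp) st.1
      ∧ (∀ x : String, x ∈ (snap.foldl (pvPassStep fp) st).2.1 ↔ x ∈ (snap.foldl (pvPassStep fp) st).1)
      ∧ (st.2.2 = true → (snap.foldl (pvPassStep fp) st).2.2 = true)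
      ∧ ((snap.foldl (pvPassStep fp) st).2.2 = false → (snap.foldl (pvPassStep fp) st).1 = st.1)
      ∧ (st.2.2 = false → (snap.foldl (pvPassStep fp) st).2.2 = true →
          st.1.length < (snap.foldl (pvPassStep fp) st).1.length) := by
  induction snap with
  | nil =>
    intro st hseen
    refine ⟨rfl, hseen, fun h => h, fun _ => rfl, fun h h' => ?_⟩
    simp only [List.foldl_nil] at h'; rw [h] at h'; cases h'
  | cons a snap ih =>
    intro st hseen
    have p1 : (pvPassStep fp st a).1 = ((PySem.Dict.mk fp).getD a []).foldl pvInsert st.1 :=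
      (pv_pairfold ((PySem.Dict.mk fp).getD a []) st hseen).1
    have p0 : ∀ x : String, x ∈ (pvPassStep fp st a).2.1 ↔ x ∈ (pvPassStep fp st a).1 :=
      (pv_pairfold ((PySem.Dict.mk fp).getD a []) st hseen).2.1
    have p2 : st.2.2 = true → (pvPassStep fp st a).2.2 = true :=
      (pv_pairfold ((PySem.Dict.mk fp).getD a []) st hseen).2.2.1
    have p3 : (pvPassStep fp st a).2.2 = false → (pvPassStep fp st a).1 = st.1 :=
      (pv_pairfold ((PySem.Dict.mk fp).getD a []) st hseen).2.2.2.1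
    have p4 : st.2.2 = false → (pvPassStep fp st a).2.2 = true →
        st.1.length < (pvPassStep fp st a).1.length :=
      (pv_pairfold ((PySem.Dict.mk fp).getD a []) st hseen).2.2.2.2
    have hstep : (pvPassStep fp st a).1 = pvStep fp st.1 a := by
      rw [pvStep_eq, pvParents]; exact p1
    obtain ⟨q1, q0, q2, q3, q4⟩ := ih (pvPassStep fp st a) p0
    refine ⟨?_, ?_, ?_, ?_, ?_⟩
    · rw [List.foldl_cons, q1, hstep, List.foldl_cons]
    · rw [List.foldl_cons]; exact q0
    · intro h; exact q2 (p2 h)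
    · intro h
      rw [List.foldl_cons] at h ⊢
      have hb : (pvPassStep fp st a).2.2 = false := by
        by_contra hb'
        simp only [Bool.not_eq_false] at hb'
        rw [q2 hb'] at h; cases h
      rw [q3 h, p3 hb]
    · intro h0 h
      rw [List.foldl_cons] at h ⊢
      cases hb : (pvPassStep fp st a).2.2 with
      | true =>
        calc st.1.length < (pvPassStep fp st a).1.length := p4 h0 hb
          _ ≤ _ := by
              rw [q1, hstep]
              exact (foldl_pvStep_prefix fp snap (pvStep fp st.1 a)).length_le
      | false =>
        have := q4 hb h
        rwa [p3 hb] at this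

theorem pvBFix_prefix (fp : List (String × List String)) :
    ∀ fuel (e : List String) (seen : PySem.Set String), (∀ x : String, x ∈ seen ↔ x ∈ e) →
      e <+: pvBFix fp fuel e seen := by
  intro fuel
  induction fuel with
  | zero => intro e seen _; exact List.prefix_rfl
  | succ fuel ih =>
    intro e seen hseen
    rw [pvBFix]
    obtain ⟨h1, h0, _, _, _⟩ := pv_passfold fp e (e, seen, false) hseen
    have hpre : e <+: (e.foldl (pvPassStep fp) (e, seen, false)).1 := by
      rw [h1]; exact foldl_pvStep_prefix fp e e
    split
    · exact hpre.trans (ih _ _ h0)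
    · exact hpre

-- MAIN: A's growing-list loop equals B's fixpoint iteration, given enough fuel on both sides
theorem pv_main (fp : List (String × List String)) :
    ∀ (fuelB : Nat) (e : List String) (seen : PySem.Set String) (fuelA : Nat),
      (∀ x : String, x ∈ seen ↔ x ∈ e) →
      (pvBFix fp fuelB e seen).length ≤ fuelA →
      (pvBFix fp fuelB e seen).length + 1 ≤ fuelB + e.length →
      pvALoop fp fuelA e 0 = pvBFix fp fuelB e seen := by
  intro fuelB
  induction fuelB with
  | zero => intro e seen fuelA _ _ h2; simp only [pvBFix] at h2; omega
  | succ fuelB ih =>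
    intro e seen fuelA hseen h1 h2
    obtain ⟨p1, p0, p2, p3, p4⟩ := pv_passfold fp e (e, seen, false) hseen
    set Pe := e.foldl (pvStep fp) e with hPe
    have hpreP : e <+: Pe := foldl_pvStep_prefix fp e e
    cases hch : (e.foldl (pvPassStep fp) (e, seen, false)).2.2 with
    | false =>
      have hPe_e : Pe = e := by rw [← p1, p3 hch]
      have hB : pvBFix fp (fuelB+1) e seen = e := by
        rw [pvBFix]; simp only [hch, Bool.false_eq_true, if_false]; rw [p3 hch]
      rw [hB] at h1 ⊢
      obtain ⟨f1, rfl⟩ : ∃ f1, fuelA = e.length + f1 := ⟨fuelA - e.length, by omega⟩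
      have := pv_aseg fp e e 0 f1 (by omega)
        (by intro k hk; simp only [Nat.zero_add]; exact List.getElem?_eq_getElem hk)
      simp only [Nat.zero_add] at this
      rw [this, ← hPe, hPe_e, pv_aterm fp f1 e e.length (le_refl _)]
    | true =>
      have hB : pvBFix fp (fuelB+1) e seen
          = pvBFix fp fuelB Pe (e.foldl (pvPassStep fp) (e, seen, false)).2.1 := by
        rw [pvBFix]; simp only [hch, if_true]; rw [p1]
      have hseen' : ∀ x : String, x ∈ (e.foldl (pvPassStep fp) (e, seen, false)).2.1 ↔ x ∈ Pe := by
        intro x; rw [← p1]; exact p0 x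
      rw [hB] at h1 h2 ⊢
      have hlen_e : e.length ≤ (pvBFix fp fuelB Pe (e.foldl (pvPassStep fp) (e, seen, false)).2.1).length :=
        (hpreP.trans (pvBFix_prefix fp fuelB Pe _ hseen')).length_le
      obtain ⟨f1, rfl⟩ : ∃ f1, fuelA = e.length + f1 := ⟨fuelA - e.length, by omega⟩
      -- run A over the first pass
      have hseg1 := pv_aseg fp e e 0 f1 (by omega)
        (by intro k hk; simp only [Nat.zero_add]; exact List.getElem?_eq_getElem hk)
      simp only [Nat.zero_add] at hseg1
      -- re-run A over the (now saturated) first e.length positions of Pe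
      have hseg2 := pv_aseg fp e Pe 0 f1 (by have h := hpreP.length_le; omega)
        (by
          intro k hk
          simp only [Nat.zero_add]
          exact prefix_getElem? hpreP (List.getElem?_eq_getElem hk))
      simp only [Nat.zero_add] at hseg2
      have hnoop : e.foldl (pvStep fp) Pe = Pe :=
        foldl_pvStep_noop fp e Pe (fun a ha p hp => pv_sat fp e e a ha p hp)
      rw [hnoop] at hseg2
      have hPlen : e.length < Pe.length := by
        have := p4 rfl hch
        rwa [p1] at this
      rw [hseg1, ← hPe, ← hseg2]
      exact ih Pe _ (e.length + f1) hseen' h1 (by omega)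

-- ===== counting bound: the result never exceeds |init| + total size of the parent lists =====

theorem pv_get?_mem (fp : List (String × List String)) (k : String) (v : List String)
    (h : (PySem.Dict.mk fp).get? k = some v) : v ∈ fp.map Prod.snd := by
  induction fp with
  | nil => simp [PySem.Dict.get?] at h
  | cons a fp ih =>
    obtain ⟨ka, va⟩ := a
    rw [PySem.Dict.get?_mk_cons] at h
    by_cases hk : ka == k
    · simp only [hk, if_true, Option.some.injEq] at h
      simp [← h]
    · simp only [hk, Bool.false_eq_true, if_false] at h
      simp [ih h]

theorem pv_parents_subset (fp : List (String × List String)) (myt : String) :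
    ∀ p ∈ pvParents fp myt, p ∈ (fp.map Prod.snd).flatten := by
  intro p hp
  unfold pvParents at hp
  rw [PySem.Dict.getD_eq_get?_getD] at hp
  cases hg : (PySem.Dict.mk fp).get? myt with
  | none => rw [hg] at hp; cases hp
  | some ps =>
    rw [hg] at hp
    simp only [Option.getD_some] at hp
    exact List.mem_flatten.mpr ⟨ps, pv_get?_mem fp myt ps hg, hp⟩

-- invariant: the current list is e0 followed by distinct new elements drawn from the parent lists
def pvInv (fp : List (String × List String)) (e0 l : List String) : Prop :=
  ∃ t, l = e0 ++ t ∧ t.Nodup ∧ ∀ x ∈ t, x ∈ (fp.map Prod.snd).flatten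

theorem pvInsert_inv (fp : List (String × List String)) (e0 l : List String) (p : String)
    (hinv : pvInv fp e0 l) (hp : p ∈ (fp.map Prod.snd).flatten) : pvInv fp e0 (pvInsert l p) := by
  obtain ⟨t, rfl, hnd, hmem⟩ := hinv
  unfold pvInsert
  split
  · exact ⟨t, rfl, hnd, hmem⟩
  · next hc =>
    refine ⟨t ++ [p], by simp, ?_, ?_⟩
    · have hpl : p ∉ e0 ++ t := fun h => hc (List.contains_iff_mem.mpr h)
      simp only [List.mem_append] at hpl
      have hpt : p ∉ t := fun h => hpl (Or.inr h)
      exact List.nodup_append.mpr ⟨hnd, List.nodup_singleton p, by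
        intro a ha b hb
        rw [List.mem_singleton] at hb
        subst hb
        exact fun h => hpt (h ▸ ha)⟩
    · intro x hx
      rcases List.mem_append.mp hx with hx | hx
      · exact hmem x hx
      · simp at hx; subst hx; exact hp

theorem foldl_pvInsert_inv (fp : List (String × List String)) (e0 : List String) (ps : List String) :
    ∀ l, (∀ p ∈ ps, p ∈ (fp.map Prod.snd).flatten) → pvInv fp e0 l →
      pvInv fp e0 (ps.foldl pvInsert l) := by
  induction ps with
  | nil => intro l _ h; exact h
  | cons p ps ih =>
    intro l hps h
    exact ih _ (fun q hq => hps q (by simp [hq])) (pvInsert_inv fp e0 l p h (hps p (by simp)))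

theorem pvStep_inv (fp : List (String × List String)) (e0 l : List String) (myt : String)
    (h : pvInv fp e0 l) : pvInv fp e0 (pvStep fp l myt) := by
  rw [pvStep_eq]
  exact foldl_pvInsert_inv fp e0 _ l (pv_parents_subset fp myt) h

theorem foldl_pvStep_inv (fp : List (String × List String)) (e0 : List String) (s : List String) :
    ∀ l, pvInv fp e0 l → pvInv fp e0 (s.foldl (pvStep fp) l) := by
  induction s with
  | nil => intro l h; exact h
  | cons a s ih => intro l h; exact ih _ (pvStep_inv fp e0 l a h)

theorem pvBFix_inv (fp : List (String × List String)) (e0 : List String) :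
    ∀ fuel (l : List String) (seen : PySem.Set String), (∀ x : String, x ∈ seen ↔ x ∈ l) →
      pvInv fp e0 l → pvInv fp e0 (pvBFix fp fuel l seen) := by
  intro fuel
  induction fuel with
  | zero => intro l seen _ h; exact h
  | succ fuel ih =>
    intro l seen hseen h
    rw [pvBFix]
    obtain ⟨h1, h0, _, _, _⟩ := pv_passfold fp l (l, seen, false) hseen
    have hinv' : pvInv fp e0 (l.foldl (pvPassStep fp) (l, seen, false)).1 := by
      rw [h1]; exact foldl_pvStep_inv fp e0 l l h
    split
    · exact ih _ _ h0 hinv'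
    · exact hinv'

theorem pvInv_length (fp : List (String × List String)) (e0 l : List String)
    (h : pvInv fp e0 l) : l.length ≤ e0.length + (fp.map (fun p => p.2.length)).sum := by
  obtain ⟨t, rfl, hnd, hmem⟩ := h
  have hsub : t ⊆ (fp.map Prod.snd).flatten := hmem
  have ht : t.length ≤ ((fp.map Prod.snd).flatten).length := by
    have h1 : t.toFinset.card = t.length := List.toFinset_card_of_nodup hnd
    have h2 : t.toFinset ⊆ ((fp.map Prod.snd).flatten).toFinset := by
      intro x hx
      rw [List.mem_toFinset] at hx ⊢
      exact hsub hx
    calc t.length = t.toFinset.card := h1.symm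
      _ ≤ ((fp.map Prod.snd).flatten).toFinset.card := Finset.card_le_card h2
      _ ≤ ((fp.map Prod.snd).flatten).length := List.toFinset_card_le _
  have hflat : ((fp.map Prod.snd).flatten).length = (fp.map (fun p => p.2.length)).sum := by
    rw [List.length_flatten, List.map_map]
    rfl
  rw [List.length_append]
  omega

-- ===== VERDICT (by name: the statement is the Claim_ definition above) =====
theorem addhighleveltypes_spec : Claim_equal_addhighleveltypes := by
  intro inittypes fig2parents _
  unfold Spec_addhighleveltypes addhighleveltypes addhighleveltypes_alt
  set F := inittypes.length + (fig2parents.map (fun p => p.2.length)).sum + 1 with hF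
  have hseen0 : ∀ x : String, x ∈ PySem.Set.ofList inittypes ↔ x ∈ inittypes :=
    fun x => PySem.Set.mem_ofList inittypes x
  have hinv : pvInv fig2parents inittypes
      (pvBFix fig2parents F inittypes (PySem.Set.ofList inittypes)) :=
    pvBFix_inv fig2parents inittypes F inittypes (PySem.Set.ofList inittypes) hseen0
      ⟨[], by simp, List.nodup_nil, by simp⟩
  have hbound := pvInv_length fig2parents inittypes _ hinv
  exact pv_main fig2parents F inittypes (PySem.Set.ofList inittypes) F hseen0 (by omega) (by omega)
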